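-- pv_equiv track=rewrite | github.com/DerPhysikeR/advent_of_code_2022 | 16/main.py | value_path
-- ===== SOURCE A (Python) =====
-- def value_path(
--     path: list[str],
--     distance_dict: dict[str, dict[str, int]],
--     flow_dict: dict[str, int],
--     time: int,
-- ) -> int:
--     elapsed_time = 0
--     iterator = iter(path)
--     released_pressure = 0
--     from_valve = next(iterator)
--     for to_valve in iterator:
--         distance = distance_dict[from_valve][to_valve]
--         elapsed_time += distance + 1
--         if elapsed_time > time:
--             break
--         released_pressure += (time - elapsed_time) * flow_dict[to_valve]
--         from_valve = to_valve
--     return released_pressure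
-- ===== SOURCE B (Python) =====
-- def value_path(
--     path: list[str],
--     distance_dict: dict[str, dict[str, int]],
--     flow_dict: dict[str, int],
--     time: int,
-- ) -> int:
--     # Phase 1: walk forward only far enough to find the legs that fit the budget,
--     # recording (cost, flow) per kept leg; never touches keys past the break.
--     legs = []
--     elapsed = 0
--     for frm, to in zip(path, path[1:]):
--         cost = distance_dict[frm][to] + 1
--         elapsed += cost
--         if elapsed > time:
--             break
--         legs.append((cost, flow_dict[to]))
--     # Phase 2: back-to-front pass with a suffix flow sum F, using the identity
--     # sum_i f_i*(time - arrival_i) = sum_i f_i*time - sum_i cost_i * F_i,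
--     # where F_i is the total flow of valves opened at or after leg i.
--     suffix_flow = 0
--     total = 0
--     for cost, flow in reversed(legs):
--         suffix_flow += flow
--         total += flow * time - cost * suffix_flow
--     return total
-- ===== Notes on version B (the rewrite author's own statement) =====
-- stated objective: alternative
-- what changed: A's forward accumulation of (time - arrival)*flow is replaced by a two-phase algorithm: collect the kept legs' (cost, flow) up to the budget break, then a BACK-TO-FRONT pass maintaining a suffix flow sum, using the algebraic identity sum f_i*(time - arrival_i) = sum f_i*time - sum cost_i * suffixFlow_i, so no arrival times are ever computed.
import Mathlib
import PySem

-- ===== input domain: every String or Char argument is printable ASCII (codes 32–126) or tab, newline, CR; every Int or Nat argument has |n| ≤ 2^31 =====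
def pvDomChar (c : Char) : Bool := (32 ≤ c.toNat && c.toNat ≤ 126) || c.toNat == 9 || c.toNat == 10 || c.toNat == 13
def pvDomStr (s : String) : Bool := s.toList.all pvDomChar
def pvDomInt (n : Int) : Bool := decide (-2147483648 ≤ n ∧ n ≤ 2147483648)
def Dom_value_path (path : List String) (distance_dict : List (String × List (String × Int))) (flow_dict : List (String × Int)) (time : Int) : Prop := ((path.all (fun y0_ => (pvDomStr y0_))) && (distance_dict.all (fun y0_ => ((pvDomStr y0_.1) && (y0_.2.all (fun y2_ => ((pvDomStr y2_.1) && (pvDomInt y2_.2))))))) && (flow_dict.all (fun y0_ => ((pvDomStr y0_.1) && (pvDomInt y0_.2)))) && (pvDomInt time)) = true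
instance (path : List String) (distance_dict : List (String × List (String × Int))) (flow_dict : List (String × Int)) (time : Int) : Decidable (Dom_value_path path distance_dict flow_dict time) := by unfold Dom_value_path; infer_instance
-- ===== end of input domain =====

-- B replaces A's forward (time - arrival)*flow accumulation by a two-phase algorithm: collect the
-- kept legs' (cost, flow), then a back-to-front pass with a suffix flow sum ("alternative").


-- dict lookup on an association list: first match (the type convention's dict semantics)
def pvLookup? {α : Type} (d : List (String × α)) (k : String) : Option α :=
  (d.find? (fun p => p.1 == k)).map (·.2)

-- ===== PORT A =====
-- A's for-loop over the iterator: state = (from_valve, elapsed_time, released_pressure); break = return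
def valuePathLoopA (distance_dict : List (String × List (String × Int))) (flow_dict : List (String × Int)) (time : Int) : List String → String → Int → Int → Int
  | [], _, _, released => released
  | to_valve :: rest, from_valve, elapsed, released =>
    let distance := (pvLookup? ((pvLookup? distance_dict from_valve).getD []) to_valve).getD 0
    let elapsed' := elapsed + distance + 1
    if elapsed' > time then released
    else valuePathLoopA distance_dict flow_dict time rest to_valve elapsed'
      (released + (time - elapsed') * ((pvLookup? flow_dict to_valve).getD 0))

def value_path (path : List String) (distance_dict : List (String × List (String × Int))) (flow_dict : List (String × Int)) (time : Int) : Int :=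
  match path with
  | [] => 0   -- Python raises StopIteration here; excluded by Pre_value_path
  | from_valve :: rest => valuePathLoopA distance_dict flow_dict time rest from_valve 0 0

-- ===== PORT B =====
-- phase 1: the kept legs' (cost, flow), walking the consecutive pairs only up to the budget break
def pvLegs (distance_dict : List (String × List (String × Int))) (flow_dict : List (String × Int)) (time : Int) : List (String × String) → Int → List (Int × Int)
  | [], _ => []
  | (frm, tov) :: ps, elapsed =>
    let cost := (pvLookup? ((pvLookup? distance_dict frm).getD []) tov).getD 0 + 1
    let elapsed' := elapsed + cost
    if elapsed' > time then []
    else (cost, (pvLookup? flow_dict tov).getD 0) :: pvLegs distance_dict flow_dict time ps elapsed'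

-- phase 2: reversed(legs) loop with state (suffix_flow, total)
def value_path_alt (path : List String) (distance_dict : List (String × List (String × Int))) (flow_dict : List (String × Int)) (time : Int) : Int :=
  let legs := pvLegs distance_dict flow_dict time (path.zip (path.drop 1)) 0
  (legs.reverse.foldl (fun st leg =>
      let suffix_flow := st.1 + leg.2
      (suffix_flow, st.2 + leg.2 * time - leg.1 * suffix_flow)) ((0 : Int), (0 : Int))).2

-- ===== PRECONDITION & SPEC =====
-- the consecutive pairs of the path, a pair's distance-table entry, and the arrival time at pair i
def pvPairs (path : List String) : List (String × String) := path.zip (path.drop 1)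
def pvCost? (distance_dict : List (String × List (String × Int))) (p : String × String) : Option Int :=
  (pvLookup? distance_dict p.1).bind (fun row => pvLookup? row p.2)
def pvArr (distance_dict : List (String × List (String × Int))) (path : List String) (i : Nat) : Int :=
  (((pvPairs path).take (i + 1)).map (fun p => (pvCost? distance_dict p).getD 0 + 1)).sum
-- Pre_ excludes EXACTLY the inputs on which Python A raises: the empty path (StopIteration) and a
-- missing distance/flow key at a pair the loop actually REACHES before the budget break (KeyError):
-- pair i is reached iff every earlier pair has its distance key and arrives within the budget; a
-- reached pair needs its distance key, and its flow key only if it too arrives within the budget.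
-- Keys occurring only past the break are NOT required, so every input on which A returns is admitted.
def Pre_value_path (path : List String) (distance_dict : List (String × List (String × Int))) (flow_dict : List (String × Int)) (time : Int) : Prop :=
  path ≠ [] ∧ ∀ i < (pvPairs path).length,
    (∀ j < i, (pvCost? distance_dict ((pvPairs path).getD j ("", ""))).isSome = true ∧
              pvArr distance_dict path j ≤ time) →
    (pvCost? distance_dict ((pvPairs path).getD i ("", ""))).isSome = true ∧
      (pvArr distance_dict path i ≤ time →
        (pvLookup? flow_dict ((pvPairs path).getD i ("", "")).2).isSome = true)
instance (path : List String) (distance_dict : List (String × List (String × Int))) (flow_dict : List (String × Int)) (time : Int) : Decidable (Pre_value_path path distance_dict flow_dict time) := by unfold Pre_value_path; infer_instance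

def pvWitness_value_path : List String × (List (String × List (String × Int))) × (List (String × Int)) × Int :=
  (["AA", "BB"], [("AA", [("BB", 2)])], [("BB", 3)], 10)

def Spec_value_path (path : List String) (distance_dict : List (String × List (String × Int))) (flow_dict : List (String × Int)) (time : Int) (out : Int) : Prop := out = value_path_alt path distance_dict flow_dict time
instance (path : List String) (distance_dict : List (String × List (String × Int))) (flow_dict : List (String × Int)) (time : Int) (out : Int) : Decidable (Spec_value_path path distance_dict flow_dict time out) := by unfold Spec_value_path; infer_instance

-- ===== CLAIM =====
def Claim_equal_value_path : Prop := ∀ (path : List String) (distance_dict : List (String × List (String × Int))) (flow_dict : List (String × Int)) (time : Int), Dom_value_path path distance_dict flow_dict time → Pre_value_path path distance_dict flow_dict time → Spec_value_path path distance_dict flow_dict time (value_path path distance_dict flow_dict time)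
-- ===== LEMMAS AND PROOFS =====

-- the sum A computes over a leg list [(c_i, f_i)], arrivals counted from a start offset e
def pvStraight (time : Int) : Int → List (Int × Int) → Int
  | _, [] => 0
  | e, (c, f) :: L => (time - (e + c)) * f + pvStraight time (e + c) L

def pvSumF : List (Int × Int) → Int
  | [] => 0
  | (_, f) :: L => f + pvSumF L

theorem pvStraight_shift (t : Int) (L : List (Int × Int)) :
    ∀ e : Int, pvStraight t e L = pvStraight t 0 L - e * pvSumF L := by
  induction L with
  | nil => intro e; simp [pvStraight, pvSumF]
  | cons hd tl ih =>
    intro e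
    obtain ⟨c, f⟩ := hd
    simp only [pvStraight, pvSumF, ih (e + c), ih (0 + c)]
    ring

-- the backward fold of B computes (total flow, the straight sum from offset 0)
theorem pvFoldr_eq (t : Int) (L : List (Int × Int)) :
    L.foldr (fun leg st =>
      let suffix_flow := st.1 + leg.2
      (suffix_flow, st.2 + leg.2 * t - leg.1 * suffix_flow)) ((0 : Int), (0 : Int))
      = (pvSumF L, pvStraight t 0 L) := by
  induction L with
  | nil => simp [pvSumF, pvStraight]
  | cons hd tl ih =>
    obtain ⟨c, f⟩ := hd
    simp only [List.foldr_cons, ih, pvSumF, pvStraight, pvStraight_shift t tl (0 + c)]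
    refine Prod.ext ?_ ?_ <;> simp <;> ring

-- A's loop from state (f, e, r) equals r plus the straight sum of the kept legs started at e
theorem valuePathLoopA_eq (dd : List (String × List (String × Int))) (fd : List (String × Int)) (t : Int) :
    ∀ (rest : List String) (f : String) (e r : Int),
      valuePathLoopA dd fd t rest f e r
        = r + pvStraight t e (pvLegs dd fd t ((f :: rest).zip rest) e) := by
  intro rest
  induction rest with
  | nil => intro f e r; simp [valuePathLoopA, pvLegs, pvStraight]
  | cons v rest' ih =>
    intro f e r
    simp only [valuePathLoopA, List.zip_cons_cons, pvLegs]
    by_cases h : e + ((pvLookup? ((pvLookup? dd f).getD []) v).getD 0 + 1) > t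
    · have h' : e + (pvLookup? ((pvLookup? dd f).getD []) v).getD 0 + 1 > t := by omega
      simp only [if_pos h, if_pos h', pvStraight]
      ring
    · have h' : ¬ (e + (pvLookup? ((pvLookup? dd f).getD []) v).getD 0 + 1 > t) := by omega
      simp only [if_neg h, if_neg h', pvStraight, ih]
      ring_nf

theorem value_path_spec : Claim_equal_value_path := by
  intro path dd fd t _ _
  unfold Spec_value_path
  cases path with
  | nil => simp [value_path, value_path_alt, pvLegs]
  | cons f rest =>
    simp only [value_path, value_path_alt, List.drop_succ_cons, List.drop_zero,
      List.foldl_reverse, pvFoldr_eq]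
    rw [valuePathLoopA_eq]
    simp
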